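-- pv_equiv track=rewrite | github.com/Roald87/AdventOfCode | 2015.py/day03.py | part1
-- ===== SOURCE A (Python) =====
-- def part1(inp):
--     houses = [(0, 0)]
--     for direction in inp:
--         x, y = houses[-1]
--         if direction == "^":
--             houses.append((x, y + 1))
--         elif direction == "v":
--             houses.append((x, y - 1))
--         elif direction == ">":
--             houses.append((x + 1, y))
--         elif direction == "<":
--             houses.append((x - 1, y))
--
--     return houses
-- ===== SOURCE B (Python) =====
-- def part1(inp):
--     # Positions as closed-form prefix counts: position k of the path is
--     # (#'>' - #'<', #'^' - #'v') over the first k valid moves.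
--     moves = [c for c in inp if c in "^v<>"]
--     return [(moves[:k].count(">") - moves[:k].count("<"),
--              moves[:k].count("^") - moves[:k].count("v"))
--             for k in range(len(moves) + 1)]
-- ===== Notes on version B (the rewrite author's own statement) =====
-- stated objective: alternative
-- what changed: A grows one list by reading its last element at each step in an if/elif chain; B has no running position at all: it filters the valid moves and computes each position independently as a closed form, the k-th position being the signed counts of '>','<','^','v' in the k-character prefix.
import Mathlib
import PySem

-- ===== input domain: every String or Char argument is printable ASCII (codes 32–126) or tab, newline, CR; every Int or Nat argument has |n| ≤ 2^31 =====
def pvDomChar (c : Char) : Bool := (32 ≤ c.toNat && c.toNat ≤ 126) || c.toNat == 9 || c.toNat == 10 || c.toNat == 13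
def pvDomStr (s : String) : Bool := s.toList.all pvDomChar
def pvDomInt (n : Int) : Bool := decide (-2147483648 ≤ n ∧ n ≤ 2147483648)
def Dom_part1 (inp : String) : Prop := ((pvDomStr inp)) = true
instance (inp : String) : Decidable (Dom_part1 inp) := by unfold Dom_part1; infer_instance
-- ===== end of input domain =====

-- B drops A's running-position loop: it filters the valid moves and computes each position independently as the signed '>'/'<' and '^'/'v' counts of a prefix slice (alternative algorithm; no speed claim).


-- ===== PORT A =====
def part1 (inp : String) : List (Int × Int) :=
  inp.toList.foldl
    (fun houses direction =>
      match PySem.List.pyGet? houses (-1) with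
      | none => houses   -- unreachable: houses is never empty
      | some (x, y) =>
        if direction = '^' then houses ++ [(x, y + 1)]
        else if direction = 'v' then houses ++ [(x, y - 1)]
        else if direction = '>' then houses ++ [(x + 1, y)]
        else if direction = '<' then houses ++ [(x - 1, y)]
        else houses)
    [(0, 0)]

-- ===== PORT B =====
-- `c in "^v<>"` on a single char is exactly membership in the chars ['^','v','<','>']
def part1_alt (inp : String) : List (Int × Int) :=
  let moves := inp.toList.filter (fun c => c ∈ ['^', 'v', '<', '>'])
  (PySem.List.pyRange 0 ((moves.length : Int) + 1) 1).map (fun k =>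
    let p := PySem.List.slice moves none (some k)
    ((p.count '>' : Int) - (p.count '<' : Int),
     (p.count '^' : Int) - (p.count 'v' : Int)))

-- ===== PRECONDITION & SPEC =====
def Spec_part1 (inp : String) (out : List (Int × Int)) : Prop := out = part1_alt inp
instance (inp : String) (out : List (Int × Int)) : Decidable (Spec_part1 inp out) := by unfold Spec_part1; infer_instance

-- ===== CLAIM (what is proved, stated in full; the proofs are below) =====
def Claim_equal_part1 : Prop := ∀ (inp : String), Dom_part1 inp → Spec_part1 inp (part1 inp)

-- ===== LEMMAS AND PROOFS =====

/-- Path of positions visited from (x, y), applying the valid moves and skipping other chars. -/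
def pathFrom : List Char → Int → Int → List (Int × Int)
  | [], _, _ => []
  | c :: cs, x, y =>
    if c = '^' then (x, y + 1) :: pathFrom cs x (y + 1)
    else if c = 'v' then (x, y - 1) :: pathFrom cs x (y - 1)
    else if c = '>' then (x + 1, y) :: pathFrom cs (x + 1) y
    else if c = '<' then (x - 1, y) :: pathFrom cs (x - 1) y
    else pathFrom cs x y

/-- A's loop, with accumulator `h ++ [(x, y)]`, appends the path from (x, y). -/
lemma part1_foldA (cs : List Char) :
    ∀ (h : List (Int × Int)) (x y : Int),
      cs.foldl
        (fun (houses : List (Int × Int)) direction =>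
          match PySem.List.pyGet? houses (-1) with
          | none => houses
          | some (x, y) =>
            if direction = '^' then houses ++ [(x, y + 1)]
            else if direction = 'v' then houses ++ [(x, y - 1)]
            else if direction = '>' then houses ++ [(x + 1, y)]
            else if direction = '<' then houses ++ [(x - 1, y)]
            else houses)
        (h ++ [(x, y)])
      = h ++ [(x, y)] ++ pathFrom cs x y := by
  induction cs with
  | nil => intro h x y; simp [pathFrom]
  | cons c cs ih =>
    intro h x y
    simp only [List.foldl_cons, PySem.List.pyGet?_neg_one_append_singleton]
    by_cases h1 : c = '^'
    · simpa [h1, pathFrom, List.append_assoc] using ih (h ++ [(x, y)]) x (y + 1)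
    · by_cases h2 : c = 'v'
      · simpa [h1, h2, pathFrom, List.append_assoc] using ih (h ++ [(x, y)]) x (y - 1)
      · by_cases h3 : c = '>'
        · simpa [h1, h2, h3, pathFrom, List.append_assoc] using ih (h ++ [(x, y)]) (x + 1) y
        · by_cases h4 : c = '<'
          · simpa [h1, h2, h3, h4, pathFrom, List.append_assoc] using ih (h ++ [(x, y)]) (x - 1) y
          · simp only [if_neg h1, if_neg h2, if_neg h3, if_neg h4, pathFrom]
            exact ih h x y

/-- Invalid characters contribute nothing: the path over the filtered moves is the path. -/
lemma pathFrom_filter (cs : List Char) :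
    ∀ (x y : Int), pathFrom (cs.filter (fun c => c ∈ ['^', 'v', '<', '>'])) x y = pathFrom cs x y := by
  induction cs with
  | nil => intro x y; rfl
  | cons c cs ih =>
    intro x y
    by_cases hm : c ∈ ['^', 'v', '<', '>']
    · fin_cases hm <;> simp_all [pathFrom]
    · have h1 : c ≠ '^' := by intro e; exact hm (by simp [e])
      have h2 : c ≠ 'v' := by intro e; exact hm (by simp [e])
      have h3 : c ≠ '<' := by intro e; exact hm (by simp [e])
      have h4 : c ≠ '>' := by intro e; exact hm (by simp [e])
      rw [List.filter_cons_of_neg (by simp [h1, h2, h3, h4])]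
      simp only [pathFrom, if_neg h1, if_neg h2, if_neg h3, if_neg h4]
      exact ih x y

/-- On a list of valid moves, the prefix-count closed form lists exactly the path from (x, y). -/
lemma counts_eq_path (ms : List Char) (hv : ∀ c ∈ ms, c ∈ ['^', 'v', '<', '>']) :
    ∀ (x y : Int),
      (List.range (ms.length + 1)).map (fun k =>
        (x + ((ms.take k).count '>' : Int) - ((ms.take k).count '<' : Int),
         y + ((ms.take k).count '^' : Int) - ((ms.take k).count 'v' : Int)))
      = (x, y) :: pathFrom ms x y := by
  induction ms with
  | nil => intro x y; simp [pathFrom]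
  | cons m ms ih =>
    intro x y
    have hm : m ∈ ['^', 'v', '<', '>'] := hv m (by simp)
    have hv' : ∀ c ∈ ms, c ∈ ['^', 'v', '<', '>'] := fun c hc => hv c (by simp [hc])
    simp only [List.length_cons]
    rw [List.range_succ_eq_map, List.map_cons, List.map_map]
    fin_cases hm
    · rw [show pathFrom ('^' :: ms) x y = (x, y + 1) :: pathFrom ms (x) (y + 1) from by simp [pathFrom]]
      rw [← ih hv' (x) (y + 1)]
      refine List.cons_eq_cons.mpr ⟨by simp, List.map_congr_left (fun k _ => ?_)⟩
      simp only [Function.comp_def, List.take_succ_cons, List.count_cons]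
      simp only [Prod.mk.injEq]
      norm_num
      omega
    · rw [show pathFrom ('v' :: ms) x y = (x, y - 1) :: pathFrom ms (x) (y - 1) from by simp [pathFrom]]
      rw [← ih hv' (x) (y - 1)]
      refine List.cons_eq_cons.mpr ⟨by simp, List.map_congr_left (fun k _ => ?_)⟩
      simp only [Function.comp_def, List.take_succ_cons, List.count_cons]
      simp only [Prod.mk.injEq]
      norm_num
      omega
    · rw [show pathFrom ('<' :: ms) x y = (x - 1, y) :: pathFrom ms (x - 1) (y) from by simp [pathFrom]]
      rw [← ih hv' (x - 1) (y)]
      refine List.cons_eq_cons.mpr ⟨by simp, List.map_congr_left (fun k _ => ?_)⟩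
      simp only [Function.comp_def, List.take_succ_cons, List.count_cons]
      simp only [Prod.mk.injEq]
      norm_num
      omega
    · rw [show pathFrom ('>' :: ms) x y = (x + 1, y) :: pathFrom ms (x + 1) (y) from by simp [pathFrom]]
      rw [← ih hv' (x + 1) (y)]
      refine List.cons_eq_cons.mpr ⟨by simp, List.map_congr_left (fun k _ => ?_)⟩
      simp only [Function.comp_def, List.take_succ_cons, List.count_cons]
      simp only [Prod.mk.injEq]
      norm_num
      omega

/-- B's closed form lists the path from the origin. -/
lemma part1_alt_eq (inp : String) :
    part1_alt inp = (0, 0) :: pathFrom inp.toList 0 0 := by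
  unfold part1_alt
  set ms := inp.toList.filter (fun c => decide (c ∈ ['^', 'v', '<', '>'])) with hms
  have hv : ∀ c ∈ ms, c ∈ ['^', 'v', '<', '>'] := by
    intro c hc
    have h := (List.mem_filter.mp (hms ▸ hc)).2
    simpa using of_decide_eq_true h
  show (PySem.List.pyRange 0 ((ms.length : Int) + 1) 1).map
      (fun k =>
        (((PySem.List.slice ms none (some k)).count '>' : Int) -
           ((PySem.List.slice ms none (some k)).count '<' : Int),
         ((PySem.List.slice ms none (some k)).count '^' : Int) -
           ((PySem.List.slice ms none (some k)).count 'v' : Int)))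
    = (0, 0) :: pathFrom inp.toList 0 0
  rw [PySem.List.pyRange_one, List.map_map,
    show (((ms.length : Int) + 1 - 0).toNat) = ms.length + 1 by omega,
    ← pathFrom_filter inp.toList 0 0, ← hms]
  have hcnt := counts_eq_path ms hv 0 0
  simp only [zero_add] at hcnt
  rw [← hcnt]
  refine List.map_congr_left (fun k _ => ?_)
  simp [PySem.List.slice_to_natCast]

-- ===== VERDICT (by name: the statement is the Claim_ definition above) =====
theorem part1_spec : Claim_equal_part1 := by
  intro inp _
  unfold Spec_part1 part1
  rw [part1_alt_eq,
    show ([((0 : Int), (0 : Int))] = [] ++ [((0 : Int), (0 : Int))]) from rfl, part1_foldA]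
  rfl
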